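-- pv_equiv track=rewrite | github.com/DivyamPal/GFG-Problem-of-The-Day | April2022/ShopInCandyStore.py | candyStore
-- ===== SOURCE A (Python) =====
-- def candyStore(candies,N,K):
--     # code here
--     candies.sort()
--     minn,maxx=0,0
--     n=N
--     for i in range(n):
--         minn+=candies[i]
--         maxx+=candies[n-i-1]
--         N-=(1+K)
--         if N<=0:
--             break
--     return minn, maxx
-- ===== SOURCE B (Python) =====
-- def candyStore(candies, N, K):
--     candies.sort()
--     if N <= 0:
--         return 0, 0
--     # number of purchases: ceil(N/(1+K)) when 1+K > 0, otherwise all N iterations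
--     count = N if K + 1 <= 0 else (N + K) // (K + 1)
--     return sum(candies[:count]), sum(candies[N - count:N])
-- ===== Notes on version B (the rewrite author's own statement) =====
-- stated objective: simpler
-- what changed: A's loop that accumulates one candy price per iteration while counting N down is replaced by a closed-form purchase count (ceiling of N/(1+K), or N when 1+K <= 0) and two slice sums over the sorted list; both sort the list in place.
-- outside the precondition, e.g. on candyStore([1, 2], 3, 1): A raises IndexError, B returns (3, 2)
import Mathlib
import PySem

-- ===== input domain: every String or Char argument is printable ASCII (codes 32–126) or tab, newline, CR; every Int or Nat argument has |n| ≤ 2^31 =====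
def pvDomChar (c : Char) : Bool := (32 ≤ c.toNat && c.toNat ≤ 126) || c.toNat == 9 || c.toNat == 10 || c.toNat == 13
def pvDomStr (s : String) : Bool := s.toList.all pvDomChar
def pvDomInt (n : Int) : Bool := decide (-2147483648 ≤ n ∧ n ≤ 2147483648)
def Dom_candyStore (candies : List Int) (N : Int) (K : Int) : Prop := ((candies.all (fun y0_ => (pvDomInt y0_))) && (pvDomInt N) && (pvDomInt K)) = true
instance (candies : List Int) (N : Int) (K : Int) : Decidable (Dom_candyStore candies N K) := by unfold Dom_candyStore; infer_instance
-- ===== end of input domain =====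

-- B replaces A's element-by-element accumulation loop by a closed-form purchase
-- count and two slice sums (objective: simpler). Both sort the list in place in
-- Python; the equivalence proved here is about the return value.

-- ===== PORT A =====
-- the for-loop of A: remaining range, then current N, minn, maxx
def candyStoreGo (cs : List Int) (n : Int) (K : Int) :
    List Int → Int → Int → Int → Int × Int
  | [], _, minn, maxx => (minn, maxx)
  | i :: rest, N, minn, maxx =>
    let minn' := minn + PySem.List.pyGetD cs i 0          -- candies[i]; exact under Pre_
    let maxx' := maxx + PySem.List.pyGetD cs (n - i - 1) 0 -- candies[n-i-1]; exact under Pre_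
    let N' := N - (1 + K)
    if N' ≤ 0 then (minn', maxx') else candyStoreGo cs n K rest N' minn' maxx'

def candyStore (candies : List Int) (N : Int) (K : Int) : Int × Int :=
  let cs := PySem.List.sorted candies (fun x => x) false
  candyStoreGo cs N K (PySem.List.pyRange 0 N 1) N 0 0

-- ===== PORT B =====
def candyStore_alt (candies : List Int) (N : Int) (K : Int) : Int × Int :=
  let cs := PySem.List.sorted candies (fun x => x) false
  if N ≤ 0 then (0, 0)
  else
    let count := if K + 1 ≤ 0 then N else PySem.Int.floordiv (N + K) (K + 1)
    ((PySem.List.slice cs none (some count)).sum,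
     (PySem.List.slice cs (some (N - count)) (some N)).sum)

-- ===== PRECONDITION & SPEC =====
-- Pre_ excludes N > len(candies), exactly the inputs where A raises IndexError.
def Pre_candyStore (candies : List Int) (N : Int) (K : Int) : Prop :=
  N ≤ (candies.length : Int)
instance (candies : List Int) (N : Int) (K : Int) : Decidable (Pre_candyStore candies N K) := by
  unfold Pre_candyStore; infer_instance

def pvWitness_candyStore : List Int × Int × Int := ([3, 2, 1, 4], 4, 1)

def Spec_candyStore (candies : List Int) (N : Int) (K : Int) (out : Int × Int) : Prop := out = candyStore_alt candies N K
instance (candies : List Int) (N : Int) (K : Int) (out : Int × Int) : Decidable (Spec_candyStore candies N K out) := by unfold Spec_candyStore; infer_instance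

-- ===== CLAIM (what is proved, stated in full; the proofs are below) =====
def Claim_equal_candyStore : Prop := ∀ (candies : List Int) (N : Int) (K : Int), Dom_candyStore candies N K → Pre_candyStore candies N K → Spec_candyStore candies N K (candyStore candies N K)

-- ===== LEMMAS AND PROOFS =====

-- number of loop iterations A performs, from a current value of N, with r range
-- elements still to come
def pvSteps (K : Int) : Nat → Int → Nat
  | 0, _ => 0
  | r+1, N => if N - (1 + K) ≤ 0 then 1 else 1 + pvSteps K r (N - (1 + K))

theorem pvSteps_le (K : Int) : ∀ (r : Nat) (N : Int), pvSteps K r N ≤ r := by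
  intro r
  induction r with
  | zero => intro N; simp [pvSteps]
  | succ r ih =>
    intro N
    simp only [pvSteps]
    split
    · omega
    · have := ih (N - (1 + K)); omega

theorem pvSteps_all (K : Int) (hK : K + 1 ≤ 0) :
    ∀ (r : Nat) (N : Int), 0 < N → pvSteps K r N = r := by
  intro r
  induction r with
  | zero => intro N _; rfl
  | succ r ih =>
    intro N hN
    have h : ¬ (N - (1 + K) ≤ 0) := by omega
    simp only [pvSteps, h, if_false]
    rw [ih (N - (1 + K)) (by omega)]
    omega

theorem pvSteps_ceil (K : Int) (hK : 0 < K + 1) :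
    ∀ (r : Nat) (N : Int), 0 < N →
      PySem.Int.floordiv (N + K) (K + 1) ≤ (r : Int) →
      (pvSteps K r N : Int) = PySem.Int.floordiv (N + K) (K + 1) := by
  intro r
  induction r with
  | zero =>
    intro N hN hle
    exfalso
    have h1 : (1 : Int) ≤ PySem.Int.floordiv (N + K) (K + 1) := by
      rw [PySem.Int.le_floordiv_iff_mul_le hK]; omega
    omega
  | succ r ih =>
    intro N hN hle
    by_cases hb : N - (1 + K) ≤ 0
    · simp only [pvSteps, hb, if_true]
      symm
      rw [PySem.Int.floordiv_eq_iff_of_pos hK]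
      push_cast
      constructor <;> nlinarith
    · simp only [pvSteps, hb, if_false]
      have h2 : PySem.Int.floordiv (N + K) (K + 1) * (K + 1) ≤ N + K ∧
          N + K < (PySem.Int.floordiv (N + K) (K + 1) + 1) * (K + 1) :=
        (PySem.Int.floordiv_eq_iff_of_pos hK).mp rfl
      have hshift : PySem.Int.floordiv (N - (1 + K) + K) (K + 1)
          = PySem.Int.floordiv (N + K) (K + 1) - 1 := by
        rw [PySem.Int.floordiv_eq_iff_of_pos hK]
        constructor <;> nlinarith [h2.1, h2.2]
      have hrec2 := ih (N - (1 + K)) (by omega) (by rw [hshift]; omega)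
      rw [hshift] at hrec2
      push_cast
      omega

theorem candyStoreGo_spec (cs : List Int) (K : Int) (n : Nat) (hn : n ≤ cs.length) :
    ∀ (r : Nat) (N minn maxx : Int), r ≤ n →
      candyStoreGo cs (n : Int) K (PySem.List.pyRange ((n - r : Nat) : Int) (n : Int) 1) N minn maxx
        = (minn + ((cs.drop (n - r)).take (pvSteps K r N)).sum,
           maxx + ((cs.drop (r - pvSteps K r N)).take (pvSteps K r N)).sum) := by
  intro r
  induction r with
  | zero =>
    intro N minn maxx _
    rw [PySem.List.pyRange_one_eq_nil (by omega)]
    simp [candyStoreGo, pvSteps]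
  | succ r ih =>
    intro N minn maxx hr
    have hi0 : ((n - (r+1) : Nat) : Int) < (n : Int) := by omega
    rw [PySem.List.pyRange_one_cons hi0]
    have hstep : ((n - (r+1) : Nat) : Int) + 1 = ((n - r : Nat) : Int) := by omega
    rw [hstep]
    have hlt1 : n - (r+1) < cs.length := by omega
    have hltr : r < cs.length := by omega
    have hg1 : PySem.List.pyGetD cs ((n - (r+1) : Nat) : Int) 0 = cs[n - (r+1)] := by
      rw [PySem.List.pyGetD_natCast]; exact List.getD_eq_getElem cs 0 hlt1
    have hg2 : (n : Int) - ((n - (r+1) : Nat) : Int) - 1 = ((r : Nat) : Int) := by omega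
    have hg2' : PySem.List.pyGetD cs ((n : Int) - ((n - (r+1) : Nat) : Int) - 1) 0 = cs[r] := by
      rw [hg2, PySem.List.pyGetD_natCast]; exact List.getD_eq_getElem cs 0 hltr
    by_cases hb : N - (1 + K) ≤ 0
    · simp only [candyStoreGo, hg1, hg2', hb, if_true, pvSteps]
      have hd1 : cs.drop (n - (r+1)) = cs[n - (r+1)] :: cs.drop (n - (r+1) + 1) :=
        (List.getElem_cons_drop hlt1).symm
      have hd2 : cs.drop r = cs[r] :: cs.drop (r + 1) :=
        (List.getElem_cons_drop hltr).symm
      simp only [Nat.add_sub_cancel]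
      have t1 : (List.take 1 (List.drop (n - (r + 1)) cs)).sum = cs[n - (r + 1)] := by
        rw [hd1]; simp only [List.take_succ_cons, List.take_zero, List.sum_cons, List.sum_nil, add_zero]
      have t2 : (List.take 1 (List.drop r cs)).sum = cs[r] := by
        rw [hd2]; simp only [List.take_succ_cons, List.take_zero, List.sum_cons, List.sum_nil, add_zero]
      rw [t1, t2]
    · simp only [candyStoreGo, hg1, hg2', hb, if_false, pvSteps]
      rw [ih (N - (1 + K)) (minn + cs[n - (r+1)]) (maxx + cs[r]) (by omega)]
      have hs' := pvSteps_le K r (N - (1 + K))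
      set s' := pvSteps K r (N - (1 + K)) with hsdef
      have hd1 : cs.drop (n - (r+1)) = cs[n - (r+1)] :: cs.drop (n - r) := by
        have : n - (r+1) + 1 = n - r := by omega
        rw [← this]
        exact (List.getElem_cons_drop hlt1).symm
      have hmax : ((cs.drop (r + 1 - (1 + s'))).take (1 + s')).sum
          = ((cs.drop (r - s')).take s').sum + cs[r] := by
        have he : r + 1 - (1 + s') = r - s' := by omega
        rw [he, Nat.add_comm 1 s', List.take_add_one]
        have hge : (cs.drop (r - s'))[s']? = some cs[r] := by
          rw [List.getElem?_drop]
          have : r - s' + s' = r := by omega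
          rw [this]
          exact List.getElem?_eq_getElem hltr
        rw [hge]
        simp
      rw [hd1, hmax, Nat.add_comm 1 s']
      simp only [List.take_succ_cons, List.sum_cons, Prod.mk.injEq]
      constructor <;> ring

-- ===== VERDICT (by name: the statement is the Claim_ definition above) =====
theorem candyStore_spec : Claim_equal_candyStore := by
  intro candies N K _ hpre
  unfold Pre_candyStore at hpre
  unfold Spec_candyStore candyStore candyStore_alt
  dsimp only
  set cs := PySem.List.sorted candies (fun x => x) false with hcs
  have hlen : cs.length = candies.length := PySem.List.length_sorted candies _ false
  by_cases hN : N ≤ 0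
  · rw [if_pos hN, PySem.List.pyRange_one_eq_nil hN]
    rfl
  · push_neg at hN
    rw [if_neg (by omega)]
    set n := N.toNat with hndef
    have hNn : N = (n : Int) := by omega
    have hnlen : n ≤ cs.length := by omega
    have h0 : ((n - n : Nat) : Int) = 0 := by omega
    have hmain := candyStoreGo_spec cs K n hnlen n N 0 0 (le_refl n)
    rw [h0, hNn] at hmain
    rw [hNn]
    rw [hmain]
    simp only [Nat.sub_self, List.drop_zero, zero_add]
    by_cases hK : K + 1 ≤ 0
    · rw [if_pos hK]
      have hs : pvSteps K n ((n : Int)) = n := pvSteps_all K hK n _ (by omega)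
      rw [hs]
      have hz : (n : Int) - (n : Int) = (0 : Int) := by ring
      rw [hz, PySem.List.slice_zero_start, PySem.List.slice_to cs (by omega)]
      simp
    · rw [if_neg hK]
      have hK' : (0 : Int) < K + 1 := by omega
      set q := PySem.Int.floordiv ((n : Int) + K) (K + 1) with hqdef
      have hq1 : (1 : Int) ≤ q := by
        rw [hqdef, PySem.Int.le_floordiv_iff_mul_le hK']; omega
      have hqN : q ≤ (n : Int) := by
        have h2 : q < (n : Int) + 1 := by
          rw [hqdef, PySem.Int.floordiv_lt_iff_lt_mul hK']
          nlinarith [Int.natCast_nonneg n]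
        omega
      have hsq : (pvSteps K n ((n : Int)) : Int) = q :=
        pvSteps_ceil K hK' n ((n : Int)) (by omega) (by rw [← hqdef]; exact hqN)
      set s := pvSteps K n ((n : Int)) with hsdef
      have hs_le : s ≤ n := pvSteps_le K n _
      rw [PySem.List.slice_to cs (by omega), PySem.List.slice_toNat cs (by omega) (by omega)]
      have e1 : q.toNat = s := by omega
      have e2 : ((n : Int) - q).toNat = n - s := by omega
      rw [e1, e2]
      have e3 : ((n : Int)).toNat - (n - s) = s := by omega
      rw [e3]
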